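-- pv_equiv track=rewrite | github.com/cogent3/cogent3 | cogent3/util/misc.py | get_merged_by_value_coords
-- ===== SOURCE A (Python) =====
-- def get_run_start_indices(values, digits=None, converter_func=None):
--     """returns starting index, value for all distinct values"""
--     assert not (digits and converter_func), \
--         'Cannot set both digits and converter_func'
--
--     if digits is not None:
--         def converter_func(x): return round(x, digits)
--     elif converter_func is None:
--         def converter_func(x): return x
--
--     last_val = None
--     for index, val in enumerate(values):
--         val = converter_func(val)
--         if val != last_val:
--             yield [index, val]
--
--         last_val = val
--
--     return
--
-- def get_merged_by_value_coords(spans_value, digits=None):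
--     """returns adjacent spans merged if they have the same value. Assumes
--     [(start, end, val), ..] structure and that spans_value is sorted in
--     ascending order.
--
--     Arguments:
--         - digits: if None, any data can be handled and exact values are
--           compared. Otherwise values are rounded to that many digits.
--     """
--     assert len(spans_value[0]) == 3, 'spans_value must have 3 records per row'
--
--     starts, ends, vals = list(zip(*spans_value))
--     indices_distinct_vals = get_run_start_indices(vals, digits=digits)
--     data = []
--     i = 0
--     for index, val in indices_distinct_vals:
--         start = starts[index]
--         end = ends[index]
--         prev_index = max(index - 1, 0)
--         try:
--             data[-1][1] = ends[prev_index]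
--         except IndexError:
--             pass
--
--         data.append([start, end, val])
--
--     if index < len(ends):
--         data[-1][1] = ends[-1]
--
--     return data
-- ===== SOURCE B (Python) =====
-- def get_merged_by_value_coords(spans_value, digits=None):
--     """Merge adjacent spans with equal (optionally rounded) value, in one
--     direct pass. Returns [] for empty input (where the original raises)."""
--     out = []
--     for start, end, val in spans_value:
--         if digits is not None:
--             val = round(val, digits)
--         if out and out[-1][2] == val:
--             out[-1][1] = end
--         else:
--             out.append([start, end, val])
--     return out
-- ===== Notes on version B (the rewrite author's own statement) =====
-- stated objective: simpler
-- what changed: Replaces A's three-stage pipeline (zip into columns, a generator yielding run-start indices, a loop that patches the previous row's end by index arithmetic plus a final patch) with one direct pass over the spans that extends the last emitted row's end in place or appends a new row.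
-- crash fix: On empty spans_value A raises IndexError at spans_value[0]; B returns []. — e.g. on get_merged_by_value_coords([], none): A raises IndexError, B returns []
import Mathlib
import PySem

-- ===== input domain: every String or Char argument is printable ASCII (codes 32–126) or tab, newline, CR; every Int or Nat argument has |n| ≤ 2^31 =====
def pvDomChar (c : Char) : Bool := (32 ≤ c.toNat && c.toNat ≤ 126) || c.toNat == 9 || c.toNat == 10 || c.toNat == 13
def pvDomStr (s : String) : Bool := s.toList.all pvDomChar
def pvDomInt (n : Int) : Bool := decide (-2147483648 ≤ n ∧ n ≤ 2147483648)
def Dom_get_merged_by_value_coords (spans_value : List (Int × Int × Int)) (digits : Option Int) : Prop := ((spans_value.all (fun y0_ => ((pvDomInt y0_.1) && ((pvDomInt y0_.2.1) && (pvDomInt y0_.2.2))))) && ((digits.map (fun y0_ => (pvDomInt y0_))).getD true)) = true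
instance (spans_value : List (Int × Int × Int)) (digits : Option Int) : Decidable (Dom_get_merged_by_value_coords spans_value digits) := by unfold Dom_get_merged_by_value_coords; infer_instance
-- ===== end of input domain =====

-- B replaces A's zip / run-start-index generator / patch-back-afterwards pipeline by one
-- direct pass that extends the last emitted span in place (objective: simpler).

-- ===== PORT A =====
-- exact port of Python's round(int, ndigits): identity for ndigits ≥ 0, otherwise banker's
-- rounding to the nearest multiple of 10^(-ndigits) (ties to the even quotient)
def pvRound (x : Int) (d : Int) : Int :=
  if 0 ≤ d then x
  else
    let m : Int := (10 : Int) ^ (-d).toNat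
    let q := PySem.Int.floordiv x m
    let r := PySem.Int.mod x m
    if 2 * r > m then (q + 1) * m
    else if 2 * r < m then q * m
    else if PySem.Int.mod q 2 = 0 then q * m else (q + 1) * m

-- the converter_func A builds: round(x, digits) if digits is not None else identity
def pvConv (digits : Option Int) (x : Int) : Int :=
  match digits with
  | none => x
  | some d => pvRound x d

-- port of the generator get_run_start_indices (yield ↦ cons); i is the enumerate counter,
-- last the Python last_val (None ↦ none; int != None is always True, matching some w ≠ none)
def runsAux (digits : Option Int) : List Int → Nat → Option Int → List (Nat × Int)
  | [], _, _ => []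
  | v :: rest, i, last =>
    let w := pvConv digits v
    if some w ≠ last then (i, w) :: runsAux digits rest (i + 1) (some w)
    else runsAux digits rest (i + 1) (some w)

-- Python's `data[-1][1] = e` guarded by try/except IndexError: no-op on empty data
def patchLast : List (List Int) → Int → List (List Int)
  | [], _ => []
  | [row], e => [row.set 1 e]
  | row :: r :: rest, e => row :: patchLast (r :: rest) e

-- the main for-loop of A; Nat subtraction i - 1 is Python's max(index - 1, 0); every index
-- produced by runsAux is in range, so getD's default 0 is never consulted (Python indexing
-- raises only out of range)
def aLoop (starts ends : List Int) : List (Nat × Int) → List (List Int) → List (List Int)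
  | [], data => data
  | (i, w) :: rest, data =>
    let d1 := patchLast data (ends.getD (i - 1) 0)
    aLoop starts ends rest (d1 ++ [[starts.getD i 0, ends.getD i 0, w]])

def get_merged_by_value_coords (spans_value : List (Int × Int × Int)) (digits : Option Int) : List (List Int) :=
  -- starts, ends, vals = list(zip(*spans_value)); the `assert len(spans_value[0]) == 3`
  -- raises IndexError on [] (excluded by Pre_) and the assert itself always passes (tuples)
  let starts := spans_value.map (fun t => t.1)
  let ends := spans_value.map (fun t => t.2.1)
  let vals := spans_value.map (fun t => t.2.2)
  let runs := runsAux digits vals 0 none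
  let data := aLoop starts ends runs []
  -- `if index < len(ends)` uses the loop variable left by the for-loop = last run start
  match runs.getLast? with
  | none => data  -- Python: NameError on `index`; only reachable for [] (outside Pre_)
  | some iw =>
    if (iw.1 : Int) < (ends.length : Int) then
      patchLast data (ends.getD (ends.length - 1) 0)  -- data[-1][1] = ends[-1]
    else data

-- ===== PORT B =====
-- B's single pass: keep the merged list, extend its last row's end while the (rounded)
-- value repeats, else append a new [start, end, value] row
def bLoop (digits : Option Int) : List (Int × Int × Int) → List (List Int) → List (List Int)
  | [], out => out
  | (s, e, v0) :: rest, out =>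
    let v := pvConv digits v0
    let out' :=
      match out.getLast? with
      | some lastRow =>
        if lastRow.getD 2 0 = v then out.dropLast ++ [lastRow.set 1 e]
        else out ++ [[s, e, v]]
      | none => out ++ [[s, e, v]]
    bLoop digits rest out'

def get_merged_by_value_coords_alt (spans_value : List (Int × Int × Int)) (digits : Option Int) : List (List Int) :=
  bLoop digits spans_value []

-- ===== PRECONDITION & SPEC =====
-- Pre_ excludes only the empty list, on which A raises IndexError at spans_value[0]
def Pre_get_merged_by_value_coords (spans_value : List (Int × Int × Int)) (digits : Option Int) : Prop :=
  spans_value ≠ []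
instance (spans_value : List (Int × Int × Int)) (digits : Option Int) : Decidable (Pre_get_merged_by_value_coords spans_value digits) := by unfold Pre_get_merged_by_value_coords; infer_instance

def pvWitness_get_merged_by_value_coords : (List (Int × Int × Int)) × Option Int :=
  ([(0, 5, 1), (5, 9, 1), (9, 12, 2)], none)

-- On empty spans_value A raises IndexError (spans_value[0]); B returns [].
def Raises_get_merged_by_value_coords (spans_value : List (Int × Int × Int)) (digits : Option Int) : Prop :=
  spans_value = []
instance (spans_value : List (Int × Int × Int)) (digits : Option Int) : Decidable (Raises_get_merged_by_value_coords spans_value digits) := by unfold Raises_get_merged_by_value_coords; infer_instance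

def pvRaiseWitness_get_merged_by_value_coords : (List (Int × Int × Int)) × Option Int := ([], none)
def pvRaiseWitnessOut_get_merged_by_value_coords : List (List Int) := []

def Spec_get_merged_by_value_coords (spans_value : List (Int × Int × Int)) (digits : Option Int) (out : List (List Int)) : Prop := out = get_merged_by_value_coords_alt spans_value digits
instance (spans_value : List (Int × Int × Int)) (digits : Option Int) (out : List (List Int)) : Decidable (Spec_get_merged_by_value_coords spans_value digits out) := by unfold Spec_get_merged_by_value_coords; infer_instance

-- ===== CLAIM (what is proved, stated in full; the proofs are below) =====
def Claim_equal_get_merged_by_value_coords : Prop := ∀ (spans_value : List (Int × Int × Int)) (digits : Option Int), Dom_get_merged_by_value_coords spans_value digits → Pre_get_merged_by_value_coords spans_value digits → Spec_get_merged_by_value_coords spans_value digits (get_merged_by_value_coords spans_value digits)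

def Claim_raises_get_merged_by_value_coords : Prop := (∀ (spans_value : List (Int × Int × Int)) (digits : Option Int), Dom_get_merged_by_value_coords spans_value digits → Raises_get_merged_by_value_coords spans_value digits → ¬ Pre_get_merged_by_value_coords spans_value digits) ∧ (Dom_get_merged_by_value_coords (pvRaiseWitness_get_merged_by_value_coords.1) (pvRaiseWitness_get_merged_by_value_coords.2) ∧ Raises_get_merged_by_value_coords (pvRaiseWitness_get_merged_by_value_coords.1) (pvRaiseWitness_get_merged_by_value_coords.2) ∧ get_merged_by_value_coords_alt (pvRaiseWitness_get_merged_by_value_coords.1) (pvRaiseWitness_get_merged_by_value_coords.2) = pvRaiseWitnessOut_get_merged_by_value_coords)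

-- ===== LEMMAS AND PROOFS =====

-- reference merge both ports are reduced to (proof-only)
def mrg : List (Int × Int × Int) → List (List Int)
  | [] => []
  | [(s, e, v)] => [[s, e, v]]
  | (s, e, v) :: (s', e', v') :: rest =>
    if v' = v then mrg ((s, e', v) :: rest)
    else [s, e, v] :: mrg ((s', e', v') :: rest)
termination_by l => l.length

def cnv (digits : Option Int) (t : Int × Int × Int) : Int × Int × Int :=
  (t.1, t.2.1, pvConv digits t.2.2)

theorem bLoop_eq (digits : Option Int) (rest : List (Int × Int × Int)) :
    ∀ (acc : List (List Int)) (s e v : Int),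
    bLoop digits rest (acc ++ [[s, e, v]]) = acc ++ mrg ((s, e, v) :: rest.map (cnv digits)) := by
  induction rest with
  | nil => intro acc s e v; simp [bLoop, mrg]
  | cons t rest' ih =>
    obtain ⟨s', e', v0'⟩ := t
    intro acc s e v
    simp only [bLoop, List.map_cons]
    rw [List.getLast?_concat]
    simp only [List.getD, List.getElem?_cons_succ, List.getElem?_cons_zero, Option.getD_some,
      List.dropLast_concat]
    have hcnv : cnv digits (s', e', v0') = (s', e', pvConv digits v0') := rfl
    rw [hcnv]
    by_cases h : pvConv digits v0' = v
    · simp only [h, eq_self_iff_true, if_true]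
      have hset : ([s, e, v].set 1 e') = [s, e', v] := rfl
      rw [hset, ih acc s e' v]
      have : mrg ((s, e, v) :: (s', e', v) :: rest'.map (cnv digits))
          = mrg ((s, e', v) :: rest'.map (cnv digits)) := by simp [mrg]
      rw [this]
    · rw [if_neg (fun hh => h hh.symm)]
      have hrw : acc ++ [[s, e, v]] ++ [[s', e', pvConv digits v0']]
          = (acc ++ [[s, e, v]]) ++ [[s', e', pvConv digits v0']] := by simp
      rw [hrw, ih (acc ++ [[s, e, v]]) s' e' (pvConv digits v0')]
      have : mrg ((s, e, v) :: (s', e', pvConv digits v0') :: rest'.map (cnv digits))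
          = [s, e, v] :: mrg ((s', e', pvConv digits v0') :: rest'.map (cnv digits)) := by
        simp [mrg, h]
      rw [this]; simp

theorem B_eq (digits : Option Int) (t : Int × Int × Int) (rest : List (Int × Int × Int)) :
    get_merged_by_value_coords_alt (t :: rest) digits = mrg ((t :: rest).map (cnv digits)) := by
  obtain ⟨s, e, v0⟩ := t
  simp only [get_merged_by_value_coords_alt, bLoop, List.getLast?_nil]
  have := bLoop_eq digits rest [] s e (pvConv digits v0)
  simpa [cnv] using this

-- A-side machinery

def chain (starts ends : List Int) : Nat × Int → List (Nat × Int) → List (List Int)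
  | (i, w), [] => [[starts.getD i 0, ends.getD i 0, w]]
  | (i, w), (i', w') :: rs =>
    [starts.getD i 0, ends.getD (i' - 1) 0, w] :: chain starts ends (i', w') rs

theorem patchLast_concat (L : List (List Int)) (row : List Int) (e : Int) :
    patchLast (L ++ [row]) e = L ++ [row.set 1 e] := by
  induction L with
  | nil => rfl
  | cons x L' ih =>
    cases L' with
    | nil => rfl
    | cons y L'' => simpa [patchLast] using ih

theorem chain_ne_nil (starts ends : List Int) (p : Nat × Int) (rs : List (Nat × Int)) :
    chain starts ends p rs ≠ [] := by
  obtain ⟨i, w⟩ := p; cases rs <;> simp [chain]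

theorem patchLast_cons (x : List Int) (l : List (List Int)) (e : Int) (h : l ≠ []) :
    patchLast (x :: l) e = x :: patchLast l e := by
  cases l with
  | nil => exact absurd rfl h
  | cons y l' => rfl

theorem aLoop_chain (starts ends : List Int) (rs : List (Nat × Int)) :
    ∀ (i : Nat) (w : Int) (acc : List (List Int)),
    aLoop starts ends ((i, w) :: rs) acc
      = patchLast acc (ends.getD (i - 1) 0) ++ chain starts ends (i, w) rs := by
  induction rs with
  | nil => intro i w acc; simp [aLoop, chain]
  | cons p rs' ih =>
    obtain ⟨i', w'⟩ := p
    intro i w acc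
    rw [show aLoop starts ends ((i, w) :: (i', w') :: rs') acc
        = aLoop starts ends ((i', w') :: rs')
            (patchLast acc (ends.getD (i - 1) 0) ++ [[starts.getD i 0, ends.getD i 0, w]]) from rfl]
    rw [ih i' w' (patchLast acc (ends.getD (i - 1) 0) ++ [[starts.getD i 0, ends.getD i 0, w]])]
    rw [patchLast_concat]
    have hset : ([starts.getD i 0, ends.getD i 0, w].set 1 (ends.getD (i' - 1) 0))
        = [starts.getD i 0, ends.getD (i' - 1) 0, w] := rfl
    rw [hset]
    simp [chain]

theorem runsAux_mem_lt (digits : Option Int) (l : List Int) :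
    ∀ (i : Nat) (last : Option Int) (p : Nat × Int),
    p ∈ runsAux digits l i last → p.1 < i + l.length := by
  induction l with
  | nil => intro i last p h; simp [runsAux] at h
  | cons v rest ih =>
    intro i last p h
    simp only [runsAux] at h
    by_cases hc : some (pvConv digits v) ≠ last
    · rw [if_pos hc] at h
      rcases List.mem_cons.mp h with h1 | h2
      · subst h1; simp
      · have := ih (i + 1) (some (pvConv digits v)) p h2; simp at this ⊢; omega
    · rw [if_neg hc] at h
      have := ih (i + 1) (some (pvConv digits v)) p h; simp at this ⊢; omega

-- getD at the junction of an append
theorem getD_mid (l1 : List Int) (x : Int) (l2 : List Int) :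
    (l1 ++ x :: l2).getD l1.length 0 = x := by
  induction l1 with
  | nil => rfl
  | cons y l1' ih => simpa using ih

theorem main_A (digits : Option Int) (ts : List (Int × Int × Int)) :
    ∀ (rest pre : List (Int × Int × Int)) (r : Nat) (S Ecur w : Int),
    pre ≠ [] →
    ts = pre ++ rest →
    (ts.map (fun t => t.1)).getD r 0 = S →
    (ts.map (fun t => t.2.1)).getD (pre.length - 1) 0 = Ecur →
    patchLast
      (chain (ts.map (fun t => t.1)) (ts.map (fun t => t.2.1)) (r, w)
        (runsAux digits (rest.map (fun t => t.2.2)) pre.length (some w)))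
      ((ts.map (fun t => t.2.1)).getD (ts.length - 1) 0)
    = mrg ((S, Ecur, w) :: rest.map (cnv digits)) := by
  intro rest
  induction rest with
  | nil =>
    intro pre r S Ecur w hpre hts hS hE
    subst hts
    simp only [List.append_nil] at hS hE ⊢
    simp only [List.map_nil, runsAux, chain, patchLast, mrg]
    have hset : ∀ a b c d : Int, ([a, b, c].set 1 d) = [a, d, c] := fun _ _ _ _ => rfl
    rw [hset, hS, hE]
  | cons c rest' ih =>
    obtain ⟨S', E', V'⟩ := c
    intro pre r S Ecur w hpre hts hS hE
    simp only [List.map_cons, runsAux]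
    rw [show cnv digits (S', E', V') = (S', E', pvConv digits V') from rfl]
    have hpre' : pre ++ [(S', E', V')] ≠ [] := by simp
    have hts' : ts = (pre ++ [(S', E', V')]) ++ rest' := by simp [hts]
    have hS'mid : (ts.map (fun t => t.1)).getD pre.length 0 = S' := by
      rw [hts]; simp only [List.map_append, List.map_cons]
      have := getD_mid (pre.map (fun t : Int × Int × Int => t.1)) S'
        (rest'.map (fun t : Int × Int × Int => t.1))
      simpa using this
    have hE' : (ts.map (fun t => t.2.1)).getD ((pre ++ [(S', E', V')]).length - 1) 0 = E' := by
      simp only [List.length_append, List.length_cons, List.length_nil, Nat.add_sub_cancel]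
      rw [hts]; simp only [List.map_append, List.map_cons]
      have := getD_mid (pre.map (fun t : Int × Int × Int => t.2.1)) E'
        (rest'.map (fun t : Int × Int × Int => t.2.1))
      simpa using this
    by_cases h : pvConv digits V' = w
    · rw [if_neg (by simp [h]), h]
      have hrec := ih (pre ++ [(S', E', V')]) r S E' w hpre' hts' hS hE'
      simp only [List.length_append, List.length_cons, List.length_nil, Nat.zero_add] at hrec
      rw [hrec]
      have : mrg ((S, Ecur, w) :: (S', E', w) :: rest'.map (cnv digits))
          = mrg ((S, E', w) :: rest'.map (cnv digits)) := by simp [mrg]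
      rw [this]
    · rw [if_pos (by simp [h])]
      simp only [chain]
      rw [patchLast_cons _ _ _ (chain_ne_nil _ _ _ _)]
      have hEprev : (ts.map (fun t => t.2.1)).getD (pre.length - 1) 0 = Ecur := hE
      rw [hS, hEprev]
      have hrec := ih (pre ++ [(S', E', V')]) pre.length S' E' (pvConv digits V') hpre' hts' hS'mid hE'
      simp only [List.length_append, List.length_cons, List.length_nil, Nat.zero_add] at hrec
      rw [hrec]
      have : mrg ((S, Ecur, w) :: (S', E', pvConv digits V') :: rest'.map (cnv digits))
          = [S, Ecur, w] :: mrg ((S', E', pvConv digits V') :: rest'.map (cnv digits)) := by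
        simp [mrg, h]
      rw [this]

theorem A_eq (digits : Option Int) (t : Int × Int × Int) (rest : List (Int × Int × Int)) :
    get_merged_by_value_coords (t :: rest) digits = mrg ((t :: rest).map (cnv digits)) := by
  obtain ⟨S0, E0, V0⟩ := t
  set ts : List (Int × Int × Int) := (S0, E0, V0) :: rest with hts
  simp only [get_merged_by_value_coords]
  -- unfold the first step of runsAux: some w0 ≠ none
  have hruns : runsAux digits (ts.map (fun t => t.2.2)) 0 none
      = (0, pvConv digits V0) :: runsAux digits (rest.map (fun t => t.2.2)) 1 (some (pvConv digits V0)) := by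
    simp [hts, runsAux]
  rw [hruns]
  rw [aLoop_chain]
  have hpe : patchLast ([] : List (List Int)) ((ts.map (fun t => t.2.1)).getD (0 - 1) 0) = [] := rfl
  rw [hpe, List.nil_append]
  -- the trailing `if index < len(ends)` always fires
  set runs := (0, pvConv digits V0) :: runsAux digits (rest.map (fun t => t.2.2)) 1 (some (pvConv digits V0)) with hr
  split
  · next heq =>
    rw [List.getLast?_eq_none_iff, hr] at heq
    exact absurd heq (by simp)
  · next iw heq =>
    obtain ⟨hne', hiw⟩ := List.mem_getLast?_eq_getLast heq
    have hmem : iw ∈ runs := by rw [hiw]; exact List.getLast_mem hne'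
    have hlt : iw.1 < ts.length := by
      rcases List.mem_cons.mp (hr ▸ hmem) with h1 | h2
      · rw [h1]; simp [hts]
      · have := runsAux_mem_lt digits (rest.map (fun t => t.2.2)) 1 (some (pvConv digits V0)) _ h2
        simp [hts] at this ⊢; omega
    rw [if_pos]
    · rw [show (List.map (fun t : Int × Int × Int => t.2.1) ts).length = ts.length by simp]
      have hmain := main_A digits ts rest [(S0, E0, V0)] 0 S0 E0 (pvConv digits V0)
        (by simp) (by simp [hts]) (by simp [hts]) (by simp [hts])
      simp only [List.length_cons, List.length_nil, Nat.zero_add] at hmain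
      rw [hmain]
      rw [hts]
      rfl
    · have h2 : iw.1 < (List.map (fun t : Int × Int × Int => t.2.1) ts).length := by simpa using hlt
      exact_mod_cast h2

-- ===== VERDICT (by name: the statement is the Claim_ definition above) =====
theorem get_merged_by_value_coords_spec : Claim_equal_get_merged_by_value_coords := by
  intro sv digits _hdom hpre
  unfold Spec_get_merged_by_value_coords
  cases sv with
  | nil => exact absurd rfl hpre
  | cons t rest => rw [A_eq, B_eq]

@[simp]
theorem get_merged_by_value_coords_raises : Claim_raises_get_merged_by_value_coords := by
  unfold Claim_raises_get_merged_by_value_coords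
  exact ⟨fun sv d _ h hp => hp h, by decide⟩
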